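-- pv_equiv track=rewrite | github.com/delalik/NJITCS100 | HW10_DelaliKumapley/HW10_DelaliKumapley_Problem1.py | initialLetterCount
-- ===== SOURCE A (Python) =====
-- def initialLetterCount(wordList):
--     myDict = {}
--     for word in wordList:
--         dictKeys = myDict.keys()
--         if word[0] in dictKeys:
--             myDict[word[0]] += 1
--         else:
--             myDict[word[0]] = 1
--     return myDict
-- ===== SOURCE B (Python) =====
-- def initialLetterCount(wordList):
--     # Two-phase count: list of first letters, then one count() per distinct letter.
--     firsts = [word[0] for word in wordList]
--     return {c: firsts.count(c) for c in dict.fromkeys(firsts)}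
-- ===== Notes on version B (the rewrite author's own statement) =====
-- stated objective: alternative
-- what changed: Replaces the incremental dict accumulation (membership test + increment per word) by a two-phase scheme: extract the list of first letters, deduplicate it in first-occurrence order with dict.fromkeys, and build the result with one list.count per distinct letter.
import Mathlib
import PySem

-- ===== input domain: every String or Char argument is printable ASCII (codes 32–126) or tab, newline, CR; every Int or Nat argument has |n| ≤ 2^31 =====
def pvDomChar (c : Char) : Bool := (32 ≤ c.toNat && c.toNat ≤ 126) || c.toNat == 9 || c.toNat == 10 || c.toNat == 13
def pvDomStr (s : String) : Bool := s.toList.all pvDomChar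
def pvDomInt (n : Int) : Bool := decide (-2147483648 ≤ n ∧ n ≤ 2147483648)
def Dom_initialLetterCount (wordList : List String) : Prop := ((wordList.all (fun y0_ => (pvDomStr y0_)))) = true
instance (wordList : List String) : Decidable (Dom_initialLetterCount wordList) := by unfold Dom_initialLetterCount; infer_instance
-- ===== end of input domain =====

-- B = A as a two-phase count (dedup first letters, then count each); return-value equivalence on word lists with no empty word (A raises IndexError there).
-- ===== PORT A =====
-- word[0]: a 1-char string; the none case is Python's IndexError on an empty word, excluded by Pre_ (the "" default is never reached inside Pre_).
def pvFirst (w : String) : String :=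
  match PySem.Str.pyGet? w 0 with
  | some c => String.ofList [c]
  | none => ""

def initialLetterCount (wordList : List String) : List (String × Int) :=
  (wordList.foldl (fun myDict word =>
      if myDict.contains (pvFirst word) then
        myDict.modify (pvFirst word) 0 (· + 1)
      else
        myDict.insert (pvFirst word) 1)
    (PySem.Dict.empty : PySem.Dict String Int)).items

-- ===== PORT B =====
def initialLetterCount_alt (wordList : List String) : List (String × Int) :=
  let firsts := wordList.map pvFirst
  (PySem.List.dedup firsts).map (fun c => (c, (firsts.count c : Int)))

-- ===== PRECONDITION & SPEC =====
-- Pre_ excludes lists containing an empty word, on which A (and B) raise IndexError at word[0].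
def Pre_initialLetterCount (wordList : List String) : Prop := ∀ w ∈ wordList, w ≠ ""
instance (wordList : List String) : Decidable (Pre_initialLetterCount wordList) := by unfold Pre_initialLetterCount; infer_instance
def pvWitness_initialLetterCount : List String := ["apple", "ant", "bee"]

def Spec_initialLetterCount (wordList : List String) (out : List (String × Int)) : Prop := out = initialLetterCount_alt wordList
instance (wordList : List String) (out : List (String × Int)) : Decidable (Spec_initialLetterCount wordList out) := by unfold Spec_initialLetterCount; infer_instance

-- ===== CLAIM (what is proved, stated in full; the proofs are below) =====
def Claim_equal_initialLetterCount : Prop := ∀ (wordList : List String), Dom_initialLetterCount wordList → Pre_initialLetterCount wordList → Spec_initialLetterCount wordList (initialLetterCount wordList)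

-- ===== LEMMAS AND PROOFS =====

-- A's guarded branch (test membership, then increment or set to 1) is exactly Counter's modify step.
theorem pv_step_eq_modify (d : PySem.Dict String Int) (k : String) :
    (if d.contains k then d.modify k 0 (· + 1) else d.insert k 1) = d.modify k 0 (· + 1) := by
  split_ifs with h
  · rfl
  · simp [PySem.Dict.insert, PySem.Dict.modify, h, PySem.Dict.getD_of_not_contains]

theorem pv_fold_eq_counter (wordList : List String) :
    wordList.foldl (fun myDict word =>
      if myDict.contains (pvFirst word) then
        myDict.modify (pvFirst word) 0 (· + 1)
      else
        myDict.insert (pvFirst word) 1)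
      (PySem.Dict.empty : PySem.Dict String Int)
    = PySem.Dict.counter (wordList.map pvFirst) := by
  rw [PySem.Dict.counter_eq_foldl, List.foldl_map]
  apply PySem.List.foldl_congr_mem
  intro d w _
  exact pv_step_eq_modify d (pvFirst w)

-- ===== VERDICT (by name: the statement is the Claim_ definition above) =====
theorem initialLetterCount_spec : Claim_equal_initialLetterCount := by
  intro wordList _ _
  unfold Spec_initialLetterCount initialLetterCount initialLetterCount_alt
  rw [pv_fold_eq_counter, PySem.Dict.items_counter]
  simp [PySem.List.dedup_eq_ofList]
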